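-- pv_equiv track=rewrite | github.com/lubimecc/lab_bd | djangoProject/charges/ch/views.py | out_saldo
-- ===== SOURCE A (Python) =====
-- def out_saldo(saldo_dict):
--     out_saldo = {}
--     out_saldo_dict = {}
--     for key in saldo_dict:
--         out_saldo[key] = []
--         for value in saldo_dict[key]:
--             if value != '0.0':
--                 out_saldo[key].append(value)
--         out_saldo_dict[key] = out_saldo[key][len(out_saldo[key]) - 1]
--
--     return out_saldo_dict
-- ===== SOURCE B (Python) =====
-- def out_saldo(saldo_dict):
--     result = {}
--     for key, values in saldo_dict.items():
--         for value in reversed(values):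
--             if value != '0.0':
--                 result[key] = value
--                 break
--         else:
--             raise IndexError('list index out of range')
--     return result
-- ===== Notes on version B (the rewrite author's own statement) =====
-- stated objective: simpler
-- what changed: Instead of building a filtered list per key and indexing its last element, B scans each value list in reverse and stops at the first non-'0.0' value, raising IndexError explicitly when none exists.
import Mathlib
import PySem

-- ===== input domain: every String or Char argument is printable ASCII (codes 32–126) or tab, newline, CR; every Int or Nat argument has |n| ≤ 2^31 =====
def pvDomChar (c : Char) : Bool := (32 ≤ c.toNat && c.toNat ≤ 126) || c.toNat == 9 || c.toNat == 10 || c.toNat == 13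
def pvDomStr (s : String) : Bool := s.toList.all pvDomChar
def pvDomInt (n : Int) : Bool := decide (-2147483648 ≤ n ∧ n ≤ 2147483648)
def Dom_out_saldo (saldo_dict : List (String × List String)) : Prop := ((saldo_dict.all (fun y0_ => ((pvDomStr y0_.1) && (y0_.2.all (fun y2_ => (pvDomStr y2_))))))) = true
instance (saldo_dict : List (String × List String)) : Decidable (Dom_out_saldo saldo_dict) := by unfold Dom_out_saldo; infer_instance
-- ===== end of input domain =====

-- B replaces A's build-a-filtered-list-then-index-its-last-element with a per-key reverse scan that
-- stops at the first non-"0.0" value (objective: simpler, same asymptotic cost).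

-- ===== PORT A =====
-- filtered-list accumulation of A's inner loop: out_saldo[key] = [v for v in values if v != '0.0']
def pvFilterNZ (values : List String) : List String :=
  values.foldl (fun acc value => if value ≠ "0.0" then acc ++ [value] else acc) []

-- one iteration of A's outer loop; the indexing out_saldo[key][len-1] is pyGet? (none = IndexError,
-- excluded by Pre_out_saldo, so the .getD "" default is never taken on admitted inputs)
def pvStepA (out_saldo_dict : PySem.Dict String String) (kv : String × List String) : PySem.Dict String String :=
  let filtered := pvFilterNZ kv.2
  PySem.Dict.insert out_saldo_dict kv.1
    ((PySem.List.pyGet? filtered ((filtered.length : Int) - 1)).getD "")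

def out_saldo (saldo_dict : List (String × List String)) : List (String × String) :=
  (saldo_dict.foldl pvStepA PySem.Dict.empty).items

-- ===== PORT B =====
-- one iteration of B's loop: reverse scan, first value ≠ "0.0" wins; the 'none' branch is where
-- Python B raises IndexError (excluded by Pre_out_saldo)
def pvStepB (result : PySem.Dict String String) (kv : String × List String) : PySem.Dict String String :=
  match kv.2.reverse.find? (fun v => v ≠ "0.0") with
  | some v => PySem.Dict.insert result kv.1 v
  | none => result

def out_saldo_alt (saldo_dict : List (String × List String)) : List (String × String) :=
  (saldo_dict.foldl pvStepB PySem.Dict.empty).items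

-- ===== PRECONDITION & SPEC =====
-- Pre_ excludes (a) keys whose value list has no value ≠ "0.0" (there Python A raises IndexError and
-- Python B raises IndexError too), and (b) duplicate keys, which a Python dict argument cannot carry.
def Pre_out_saldo (saldo_dict : List (String × List String)) : Prop :=
  (saldo_dict.map Prod.fst).Nodup ∧ ∀ kv ∈ saldo_dict, ∃ v ∈ kv.2, v ≠ "0.0"
instance (saldo_dict : List (String × List String)) : Decidable (Pre_out_saldo saldo_dict) := by unfold Pre_out_saldo; infer_instance

def pvWitness_out_saldo : (List (String × List String)) := [("a", ["0.0", "1.5"]), ("b", ["2.0"])]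

def Spec_out_saldo (saldo_dict : List (String × List String)) (out : List (String × String)) : Prop := out = out_saldo_alt saldo_dict
instance (saldo_dict : List (String × List String)) (out : List (String × String)) : Decidable (Spec_out_saldo saldo_dict out) := by unfold Spec_out_saldo; infer_instance

-- ===== CLAIM (what is proved, stated in full; the proofs are below) =====
def Claim_equal_out_saldo : Prop := ∀ (saldo_dict : List (String × List String)), Dom_out_saldo saldo_dict → Pre_out_saldo saldo_dict → Spec_out_saldo saldo_dict (out_saldo saldo_dict)

-- ===== LEMMAS AND PROOFS =====

theorem pvFilterNZ_eq_filter (l : List String) :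
    pvFilterNZ l = l.filter (fun v => decide (v ≠ "0.0")) := by
  have := PySem.List.foldl_append_if (fun v : String => decide (v ≠ "0.0")) id l []
  simpa [pvFilterNZ] using this

theorem pvGetLast_pyGet? (f : List String) (h : f ≠ []) :
    PySem.List.pyGet? f ((f.length : Int) - 1) = f.getLast? := by
  have hl : 0 < f.length := List.length_pos_iff.mpr h
  simp only [PySem.List.pyGet?, PySem.List.pyIdx?]
  rw [if_pos (by omega), if_pos (by omega)]
  rw [List.getLast?_eq_getElem?]
  simp only [Option.bind_some]
  congr 1
  omega

theorem pvStep_eq (acc : PySem.Dict String String) (kv : String × List String)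
    (h : ∃ v ∈ kv.2, v ≠ "0.0") : pvStepA acc kv = pvStepB acc kv := by
  obtain ⟨v, hv, hvne⟩ := h
  have hf : v ∈ kv.2.filter (fun v => decide (v ≠ "0.0")) :=
    List.mem_filter.mpr ⟨hv, by simpa using hvne⟩
  have hne : kv.2.filter (fun v => decide (v ≠ "0.0")) ≠ [] := List.ne_nil_of_mem hf
  have hfind : kv.2.reverse.find? (fun v => decide (v ≠ "0.0")) =
      (kv.2.filter (fun v => decide (v ≠ "0.0"))).getLast? := by
    rw [← List.head?_reverse, ← List.filter_reverse]
    exact Eq.symm List.head?_filter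
  obtain ⟨w, hw⟩ : ∃ w, (kv.2.filter (fun v => decide (v ≠ "0.0"))).getLast? = some w := by
    cases hlast : (kv.2.filter (fun v => decide (v ≠ "0.0"))).getLast? with
    | none => exact absurd (List.getLast?_eq_none_iff.mp hlast) hne
    | some w => exact ⟨w, rfl⟩
  simp only [pvStepA, pvStepB, pvFilterNZ_eq_filter, hfind, hw,
    pvGetLast_pyGet? _ hne, Option.getD_some]

theorem pvFoldl_eq (l : List (String × List String)) :
    ∀ (acc : PySem.Dict String String), (∀ kv ∈ l, ∃ v ∈ kv.2, v ≠ "0.0") →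
      l.foldl pvStepA acc = l.foldl pvStepB acc := by
  induction l with
  | nil => intro _ _; rfl
  | cons kv rest ih =>
    intro acc h
    simp only [List.foldl_cons]
    rw [pvStep_eq acc kv (h kv (List.mem_cons_self ..))]
    exact ih _ (fun kv' hkv' => h kv' (List.mem_cons_of_mem _ hkv'))

-- ===== VERDICT (by name: the statement is the Claim_ definition above) =====
theorem out_saldo_spec : Claim_equal_out_saldo := by
  intro saldo_dict _ hpre
  unfold Spec_out_saldo out_saldo out_saldo_alt
  rw [pvFoldl_eq saldo_dict PySem.Dict.empty hpre.2]
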